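-- pv_equiv track=rewrite | github.com/tosmith97/cs224n | process_xml.py | create_skipgram
-- ===== SOURCE A (Python) =====
-- def create_skipgram(word_sequence, window_size):
--     '''
--     Converts sequence of words to the following form:
--     [(<center-word>, <context-word>), ...]
--     consider splitting on sentences
--     '''
--     word_sequence = [word for word in word_sequence if word is not '/']
--     length = len(word_sequence)
--     center_context_pairs = []
--     for i in range(length):
--         start = max(0, i - window_size)
--         end = min(length, i + window_size + 1)
--         context = word_sequence[start:i] + word_sequence[i+1:end]
--         for ctxt in context:
--             center_context_pairs.append((word_sequence[i], ctxt))
--     return center_context_pairs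
-- ===== SOURCE B (Python) =====
-- def create_skipgram(word_sequence, window_size):
--     '''
--     Converts sequence of words to the following form:
--     [(<center-word>, <context-word>), ...]
--     Different algorithm: generate index pairs grouped by distance d = 1..window_size,
--     sort them lexicographically by (center, context) index, then map to words.
--     Correct because A's output is exactly all (i, k) with |i-k| in 1..window_size,
--     ordered lexicographically by (i, k).
--     '''
--     words = [word for word in word_sequence if word is not '/']
--     n = len(words)
--     pairs_by_distance = []
--     for d in range(1, min(window_size, n - 1) + 1):
--         for i in range(n):
--             if i - d >= 0:
--                 pairs_by_distance.append((i, i - d))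
--             if i + d < n:
--                 pairs_by_distance.append((i, i + d))
--     pairs_by_distance.sort()
--     return [(words[i], words[k]) for i, k in pairs_by_distance]
-- ===== Notes on version B (the rewrite author's own statement) =====
-- stated objective: alternative
-- what changed: Instead of walking each center word and concatenating two window slices, B generates all (center, context) index pairs grouped by distance d = 1..min(window_size, n-1), sorts them lexicographically, and maps indices to words; A's output is exactly the lexicographic enumeration of these pairs.
-- intended difference: For window_size <= -2 with more than -window_size surviving words, A's slice end min(length, i+window_size+1) goes negative and Python wraps it to the tail, so A returns accidental pairs of far-away words; B returns [] there, the intended result for a nonpositive window. — e.g. on create_skipgram(["a", "b", "c"], -2): A returns [("a", "b")], B returns []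
import Mathlib
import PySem

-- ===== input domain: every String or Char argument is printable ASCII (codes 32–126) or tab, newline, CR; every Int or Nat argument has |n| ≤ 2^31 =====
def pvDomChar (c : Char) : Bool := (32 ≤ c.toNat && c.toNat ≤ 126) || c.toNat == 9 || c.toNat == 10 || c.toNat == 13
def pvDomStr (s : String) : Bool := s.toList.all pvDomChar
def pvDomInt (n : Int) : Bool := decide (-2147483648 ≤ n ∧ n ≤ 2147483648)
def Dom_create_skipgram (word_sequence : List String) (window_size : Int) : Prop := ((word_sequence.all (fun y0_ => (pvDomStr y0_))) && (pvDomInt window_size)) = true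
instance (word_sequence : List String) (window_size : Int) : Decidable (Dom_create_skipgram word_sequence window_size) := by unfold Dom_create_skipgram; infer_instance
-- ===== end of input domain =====

-- B replaces A's per-center slice building by a different algorithm: generate all
-- (center, context) index pairs grouped by distance d = 1..window_size, sort them
-- lexicographically, then map indices to words; same output. On window_size ≤ -2 with
-- enough surviving words A's negative slice end wraps to the tail while B returns []
-- (the intended value for a nonpositive window) — stated as D_ below.


-- ===== PORT A =====
-- `word is not '/'` ported as inequality: one-character ASCII strings are interned in CPython,
-- so the identity test coincides with equality on the stated domain.
def create_skipgram (word_sequence : List String) (window_size : Int) : List (String × String) :=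
  let ws := word_sequence.filter (fun word => word ≠ "/")
  let length : Int := ws.length
  (PySem.List.pyRange 0 length).foldl (fun pairs i =>
    let start := max 0 (i - window_size)
    let stop := min length (i + window_size + 1)
    let context := PySem.List.slice ws (some start) (some i) ++ PySem.List.slice ws (some (i + 1)) (some stop)
    context.foldl (fun p c => p ++ [(PySem.List.pyGetD ws i "", c)]) pairs) []

-- ===== PORT B =====
def create_skipgram_alt (word_sequence : List String) (window_size : Int) : List (String × String) :=
  let words := word_sequence.filter (fun word => word ≠ "/")
  let n : Int := words.length
  let pbd := (PySem.List.pyRange 1 (min window_size (n - 1) + 1)).foldl (fun acc d =>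
    (PySem.List.pyRange 0 n).foldl (fun acc i =>
      let acc := if 0 ≤ i - d then acc ++ [(i, i - d)] else acc
      if i + d < n then acc ++ [(i, i + d)] else acc) acc) []
  let srt := PySem.List.sorted2 pbd (fun p => p.1) (fun p => p.2)
  srt.map (fun p => (PySem.List.pyGetD words p.1 "", PySem.List.pyGetD words p.2 ""))

-- ===== PRECONDITION & SPEC =====
-- For window_size ≤ -2 and more than -window_size words surviving the filter, A's slice end
-- min(length, i+window_size+1) is negative so Python wraps it to the tail and A returns
-- accidental far-away pairs; B returns [] there, the intended value for a nonpositive window.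
def D_create_skipgram (word_sequence : List String) (window_size : Int) : Prop :=
  window_size ≤ -2 ∧ -window_size < (word_sequence.countP (fun s => s ≠ "/") : Int)
instance (word_sequence : List String) (window_size : Int) : Decidable (D_create_skipgram word_sequence window_size) := by unfold D_create_skipgram; infer_instance
def Spec_create_skipgram (word_sequence : List String) (window_size : Int) (out : List (String × String)) : Prop := ¬ D_create_skipgram word_sequence window_size → out = create_skipgram_alt word_sequence window_size
instance (word_sequence : List String) (window_size : Int) (out : List (String × String)) : Decidable (Spec_create_skipgram word_sequence window_size out) := by unfold Spec_create_skipgram; infer_instance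
def pvDiffWitness_create_skipgram : List String × Int := (["a", "b", "c"], -2)
def pvDiffWitnessOut_create_skipgram : (List (String × String)) × (List (String × String)) := ([("a", "b")], [])

-- ===== CLAIM (what is proved, stated in full; the proofs are below) =====
def Claim_unchanged_create_skipgram : Prop := ∀ (word_sequence : List String) (window_size : Int), Dom_create_skipgram word_sequence window_size → Spec_create_skipgram word_sequence window_size (create_skipgram word_sequence window_size)
def Claim_changed_create_skipgram : Prop := Dom_create_skipgram (pvDiffWitness_create_skipgram.1) (pvDiffWitness_create_skipgram.2) ∧ D_create_skipgram (pvDiffWitness_create_skipgram.1) (pvDiffWitness_create_skipgram.2) ∧ create_skipgram (pvDiffWitness_create_skipgram.1) (pvDiffWitness_create_skipgram.2) = pvDiffWitnessOut_create_skipgram.1 ∧ create_skipgram_alt (pvDiffWitness_create_skipgram.1) (pvDiffWitness_create_skipgram.2) = pvDiffWitnessOut_create_skipgram.2 ∧ pvDiffWitnessOut_create_skipgram.1 ≠ pvDiffWitnessOut_create_skipgram.2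
def Claim_exact_create_skipgram : Prop := ∀ (word_sequence : List String) (window_size : Int), Dom_create_skipgram word_sequence window_size → D_create_skipgram word_sequence window_size → create_skipgram word_sequence window_size ≠ create_skipgram_alt word_sequence window_size

-- ===== LEMMAS AND PROOFS =====

-- the per-center context index range of A: left neighbors then right neighbors, ascending
def pvCtx (n w i : Int) : List Int :=
  PySem.List.pyRange (max 0 (i - w)) i ++ PySem.List.pyRange (i + 1) (min n (i + w + 1))

-- A's output as index pairs, in A's order
def pvT (n w : Int) : List (Int × Int) :=
  (PySem.List.pyRange 0 n).flatMap (fun i => (pvCtx n w i).map (fun k => (i, k)))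

-- one distance-d block of B's pre-sort list
def pvBlk (n d i : Int) : List (Int × Int) :=
  (if 0 ≤ i - d then [(i, i - d)] else []) ++ (if i + d < n then [(i, i + d)] else [])

-- B's pre-sort list as a flatMap
def pvIdx (n m : Int) : List (Int × Int) :=
  (PySem.List.pyRange 1 (m + 1)).flatMap (fun d => (PySem.List.pyRange 0 n).flatMap (fun i => pvBlk n d i))

lemma pvRangePW : ∀ (b a : Int), (PySem.List.pyRange a b).Pairwise (· < ·) := by
  intro b a
  induction h : (b - a).toNat generalizing a with
  | zero => rw [PySem.List.pyRange_one_eq_nil (by omega)]; exact List.Pairwise.nil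
  | succ m ih =>
    rw [PySem.List.pyRange_one_cons (by omega : a < b)]
    refine List.Pairwise.cons ?_ (ih (a + 1) (by omega))
    intro x hx
    rw [PySem.List.mem_pyRange_one] at hx
    omega

lemma pvMapGet {α : Type} (xs : List α) (d : α) : ∀ (b a : Int), 0 ≤ a → b ≤ (xs.length : Int) →
    (PySem.List.pyRange a b).map (fun k => PySem.List.pyGetD xs k d)
      = List.take (b.toNat - a.toNat) (List.drop a.toNat xs) := by
  intro b a ha hb
  induction h : (b - a).toNat generalizing a with
  | zero =>
    rw [PySem.List.pyRange_one_eq_nil (by omega), show b.toNat - a.toNat = 0 by omega]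
    simp
  | succ m ih =>
    rw [PySem.List.pyRange_one_cons (by omega : a < b)]
    simp only [List.map_cons]
    rw [PySem.List.pyGetD_eq_getElem xs d ha (by omega)]
    rw [ih (a + 1) (by omega) (by omega)]
    rw [List.drop_eq_getElem_cons (by omega : a.toNat < xs.length)]
    rw [show b.toNat - a.toNat = (b.toNat - (a + 1).toNat) + 1 by omega]
    rw [List.take_succ_cons]
    rw [show (a + 1).toNat = a.toNat + 1 by omega]

lemma pvSliceNil {α : Type} (xs : List α) (a b : Int)
    (h : PySem.List.clampIdx xs.length b ≤ PySem.List.clampIdx xs.length a) :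
    PySem.List.slice xs (some a) (some b) = [] := by
  simp [PySem.List.slice, Nat.sub_eq_zero_of_le h]

lemma pvSliceEqMapGet (xs : List String) (a b : Int) (ha : 0 ≤ a) (hb : b ≤ (xs.length : Int)) (hb0 : 0 ≤ b) :
    PySem.List.slice xs (some a) (some b)
      = (PySem.List.pyRange a b).map (fun k => PySem.List.pyGetD xs k "") := by
  rw [pvMapGet xs "" b a ha hb, PySem.List.slice_toNat xs ha hb0]

lemma pvMemBlk (n d i : Int) (p : Int × Int) :
    p ∈ pvBlk n d i ↔ (p.1 = i ∧ ((p.2 = i - d ∧ 0 ≤ i - d) ∨ (p.2 = i + d ∧ i + d < n))) := by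
  simp only [pvBlk, List.mem_append]
  constructor
  · rintro (h | h) <;> split_ifs at h <;> simp_all [Prod.ext_iff]
  · rintro ⟨h1, (⟨h2, h3⟩ | ⟨h2, h3⟩)⟩
    · left; rw [if_pos h3]; simp [Prod.ext_iff, h1, h2]
    · right; rw [if_pos h3]; simp [Prod.ext_iff, h1, h2]

lemma pvMemIdx (n m : Int) (p : Int × Int) :
    p ∈ pvIdx n m ↔ (0 ≤ p.1 ∧ p.1 < n ∧ 0 ≤ p.2 ∧ p.2 < n ∧
      ((1 ≤ p.1 - p.2 ∧ p.1 - p.2 ≤ m) ∨ (1 ≤ p.2 - p.1 ∧ p.2 - p.1 ≤ m))) := by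
  simp only [pvIdx, List.mem_flatMap, PySem.List.mem_pyRange_one, pvMemBlk]
  constructor
  · rintro ⟨d, ⟨hd1, hd2⟩, i, ⟨hi1, hi2⟩, h1, (⟨h2, h3⟩ | ⟨h2, h3⟩)⟩ <;> omega
  · rintro ⟨h1, h2, h3, h4, (⟨h5, h6⟩ | ⟨h5, h6⟩)⟩
    · exact ⟨p.1 - p.2, ⟨by omega, by omega⟩, p.1, ⟨by omega, by omega⟩, rfl, Or.inl ⟨by omega, by omega⟩⟩
    · exact ⟨p.2 - p.1, ⟨by omega, by omega⟩, p.1, ⟨by omega, by omega⟩, rfl, Or.inr ⟨by omega, by omega⟩⟩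

lemma pvMemT (n w : Int) (p : Int × Int) :
    p ∈ pvT n w ↔ (0 ≤ p.1 ∧ p.1 < n ∧
      ((max 0 (p.1 - w) ≤ p.2 ∧ p.2 < p.1) ∨ (p.1 + 1 ≤ p.2 ∧ p.2 < min n (p.1 + w + 1)))) := by
  simp only [pvT, List.mem_flatMap, List.mem_map, pvCtx, List.mem_append, PySem.List.mem_pyRange_one]
  constructor
  · rintro ⟨i, ⟨hi1, hi2⟩, k, (⟨hk1, hk2⟩ | ⟨hk1, hk2⟩), hp⟩ <;>
      · rw [← hp]; simp only; omega
  · rintro ⟨h1, h2, (⟨h3, h4⟩ | ⟨h3, h4⟩)⟩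
    · exact ⟨p.1, ⟨by omega, by omega⟩, p.2, Or.inl ⟨by omega, by omega⟩, rfl⟩
    · exact ⟨p.1, ⟨by omega, by omega⟩, p.2, Or.inr ⟨by omega, by omega⟩, rfl⟩

lemma pvBlkNodup (n d i : Int) (hd : 1 ≤ d) : (pvBlk n d i).Nodup := by
  unfold pvBlk
  split_ifs <;> simp [Prod.ext_iff] <;> omega

lemma pvIdxNodup (n m : Int) : (pvIdx n m).Nodup := by
  unfold pvIdx
  rw [List.nodup_flatMap]
  refine ⟨?_, ?_⟩
  · intro d hd
    rw [PySem.List.mem_pyRange_one] at hd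
    rw [List.nodup_flatMap]
    refine ⟨fun i _ => pvBlkNodup n d i (by omega), ?_⟩
    refine (pvRangePW n 0).imp_of_mem ?_
    intro i j _ _ hij
    intro p hp hq
    rw [pvMemBlk] at hp hq
    omega
  · refine (pvRangePW (m + 1) 1).imp_of_mem ?_
    intro d e hd he hde
    rw [PySem.List.mem_pyRange_one] at hd he
    intro p hp hq
    rw [List.mem_flatMap] at hp hq
    obtain ⟨i, _, hp⟩ := hp
    obtain ⟨j, _, hq⟩ := hq
    rw [pvMemBlk] at hp hq
    omega

lemma pvCtxPW (n w i : Int) : (pvCtx n w i).Pairwise (· < ·) := by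
  unfold pvCtx
  rw [List.pairwise_append]
  refine ⟨pvRangePW _ _, pvRangePW _ _, ?_⟩
  intro a ha b hb
  rw [PySem.List.mem_pyRange_one] at ha hb
  omega

lemma pvTPW (n w : Int) :
    (pvT n w).Pairwise (fun p q => p.1 < q.1 ∨ (p.1 = q.1 ∧ p.2 < q.2)) := by
  unfold pvT
  have H : ∀ (L : List Int), L.Pairwise (· < ·) →
      (L.flatMap (fun i => (pvCtx n w i).map (fun k => (i, k)))).Pairwise
        (fun p q => p.1 < q.1 ∨ (p.1 = q.1 ∧ p.2 < q.2)) := by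
    intro L hL
    induction L with
    | nil => exact List.Pairwise.nil
    | cons x xs ih =>
      rw [List.flatMap_cons, List.pairwise_append]
      refine ⟨?_, ih hL.of_cons, ?_⟩
      · rw [List.pairwise_map]
        exact (pvCtxPW n w x).imp (fun h => Or.inr ⟨rfl, h⟩)
      · intro p hp q hq
        rw [List.mem_map] at hp
        rw [List.mem_flatMap] at hq
        obtain ⟨k, _, hp⟩ := hp
        obtain ⟨y, hy, hq⟩ := hq
        rw [List.mem_map] at hq
        obtain ⟨k', _, hq⟩ := hq
        have hxy : x < y := (List.pairwise_cons.mp hL).1 y hy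
        left
        rw [← hp, ← hq]
        exact hxy
  exact H _ (pvRangePW n 0)

lemma pvPerm (n w : Int) (hw : 0 ≤ w) : (pvT n w).Perm (pvIdx n (min w (n - 1))) := by
  rw [List.perm_ext_iff_of_nodup
    ((pvTPW n w).imp (by intro a b h; simp [Prod.ext_iff]; omega))
    (pvIdxNodup n (min w (n - 1)))]
  intro p
  rw [pvMemT, pvMemIdx]
  omega

-- sorted2 with fst/snd keys is sorted with the lexicographic key
lemma pvSorted2Eq (xs : List (Int × Int)) :
    PySem.List.sorted2 xs (fun p => p.1) (fun p => p.2)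
      = PySem.List.sorted xs (fun p => toLex p) := by
  have hfun : (fun (a b : Int × Int) => (decide (a.1 < b.1) || (!decide (b.1 < a.1) && decide (a.2 < b.2))))
      = (fun (a b : Int × Int) => decide (toLex a < toLex b)) := by
    funext a b
    have hiff : (toLex a < toLex b) ↔ (a.1 < b.1 ∨ (¬ b.1 < a.1 ∧ a.2 < b.2)) := by
      rw [Prod.Lex.lt_iff]
      simp only [ofLex_toLex]
      omega
    rw [decide_eq_decide.mpr hiff, Bool.decide_or, Bool.decide_and, decide_not]
  show xs.foldl (fun acc x => PySem.List.insertBy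
      (fun a b => decide (a.1 < b.1) || (!decide (b.1 < a.1) && decide (a.2 < b.2))) x acc) []
    = xs.foldl (fun acc x => PySem.List.insertBy (fun a b => decide (toLex a < toLex b)) x acc) []
  rw [hfun]

lemma pvSortedIdx (n w : Int) (hw : 0 ≤ w) :
    PySem.List.sorted2 (pvIdx n (min w (n - 1))) (fun p => p.1) (fun p => p.2) = pvT n w := by
  rw [pvSorted2Eq]
  refine PySem.List.sorted_eq_of_perm_of_pairwise_lt _ _ _ (pvPerm n w hw) ?_
  refine (pvTPW n w).imp ?_
  intro a b h
  rw [Prod.Lex.lt_iff]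
  exact h

-- B's pre-sort foldl equals pvIdx
lemma pvFoldEqIdx (n m : Int) :
    ((PySem.List.pyRange 1 (m + 1)).foldl (fun acc d =>
      (PySem.List.pyRange 0 n).foldl (fun acc i =>
        let acc := if 0 ≤ i - d then acc ++ [(i, i - d)] else acc
        if i + d < n then acc ++ [(i, i + d)] else acc) acc) [])
      = pvIdx n m := by
  have hinner : ∀ (d : Int) (acc : List (Int × Int)),
      (PySem.List.pyRange 0 n).foldl (fun acc i =>
        let acc := if 0 ≤ i - d then acc ++ [(i, i - d)] else acc
        if i + d < n then acc ++ [(i, i + d)] else acc) acc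
        = acc ++ (PySem.List.pyRange 0 n).flatMap (fun i => pvBlk n d i) := by
    intro d acc
    rw [PySem.List.foldl_congr_mem _ _ (fun acc i => acc ++ pvBlk n d i) _ ?_]
    · exact PySem.List.foldl_append_eq_flatMap _ _ _
    · intro acc' i _
      simp only [pvBlk]
      split_ifs <;> simp
  rw [PySem.List.foldl_congr_mem _ _
    (fun acc d => acc ++ (PySem.List.pyRange 0 n).flatMap (fun i => pvBlk n d i)) _
    (fun acc' d _ => hinner d acc')]
  rw [PySem.List.foldl_append_eq_flatMap]
  rfl

-- A's foldl equals pvT mapped to words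
lemma pvAEq (words : List String) (w : Int) (hw : 0 ≤ w) :
    ((PySem.List.pyRange 0 (words.length : Int)).foldl (fun pairs i =>
      let start := max 0 (i - w)
      let stop := min (words.length : Int) (i + w + 1)
      let context := PySem.List.slice words (some start) (some i) ++ PySem.List.slice words (some (i + 1)) (some stop)
      context.foldl (fun p c => p ++ [(PySem.List.pyGetD words i "", c)]) pairs) [])
      = (pvT (words.length : Int) w).map
          (fun p => (PySem.List.pyGetD words p.1 "", PySem.List.pyGetD words p.2 "")) := by
  have hbody : ∀ (acc : List (String × String)) (i : Int), i ∈ PySem.List.pyRange 0 (words.length : Int) →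
      (let start := max 0 (i - w)
       let stop := min (words.length : Int) (i + w + 1)
       let context := PySem.List.slice words (some start) (some i) ++ PySem.List.slice words (some (i + 1)) (some stop)
       context.foldl (fun p c => p ++ [(PySem.List.pyGetD words i "", c)]) acc)
      = acc ++ ((pvCtx (words.length : Int) w i).map (fun k => (i, k))).map
          (fun p => (PySem.List.pyGetD words p.1 "", PySem.List.pyGetD words p.2 "")) := by
    intro acc i hi
    rw [PySem.List.mem_pyRange_one] at hi
    simp only
    rw [PySem.List.foldl_append_singleton_eq_map]
    congr 1
    rw [pvSliceEqMapGet words _ _ (by omega) (by omega) (by omega),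
        pvSliceEqMapGet words _ _ (by omega) (by omega) (by omega)]
    simp only [pvCtx, List.map_append, List.map_map]
    rfl
  rw [PySem.List.foldl_congr_mem _ _ _ _ hbody]
  rw [PySem.List.foldl_append_eq_flatMap]
  rw [pvT, List.map_flatMap]
  rfl

-- ===== VERDICT (by name: the statement is the Claim_ definition above) =====
theorem create_skipgram_spec : Claim_unchanged_create_skipgram := by
  intro ws w _ hnD
  simp only [create_skipgram, create_skipgram_alt]
  by_cases hw : 0 ≤ w
  · rw [pvAEq (ws.filter (fun word => word ≠ "/")) w hw,
        pvFoldEqIdx ((ws.filter (fun word => word ≠ "/")).length : Int) (min w (((ws.filter (fun word => word ≠ "/")).length : Int) - 1)),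
        pvSortedIdx ((ws.filter (fun word => word ≠ "/")).length : Int) w hw]
  · -- w ≤ -1: B's distance range is empty, so B = []; A's slices are all empty too
    have e2 : PySem.List.pyRange 1 (min w (((ws.filter (fun word => word ≠ "/")).length : Int) - 1) + 1) = [] := PySem.List.pyRange_one_eq_nil (by omega)
    simp only [e2, List.foldl_nil]
    have hn : ((ws.filter (fun word => word ≠ "/")).length : Int) ≤ -w ∨ w = -1 := by
      simp only [D_create_skipgram, not_and, not_lt, List.countP_eq_length_filter] at hnD
      by_cases h2 : w ≤ -2
      · exact Or.inl (hnD h2)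
      · exact Or.inr (by omega)
    refine Eq.trans (PySem.List.foldl_congr_mem _ _ (fun (p : List (String × String)) (_ : Int) => p) _ ?_) (List.foldl_fixed _)
    intro acc i hi
    rw [PySem.List.mem_pyRange_one] at hi
    obtain ⟨hi0, hin⟩ := hi
    have s1nil : PySem.List.slice (ws.filter (fun word => word ≠ "/")) (some (max 0 (i - w))) (some i) = [] := by
      apply pvSliceNil
      simp only [PySem.List.clampIdx]
      split_ifs <;> omega
    have s2nil : PySem.List.slice (ws.filter (fun word => word ≠ "/")) (some (i + 1)) (some (min ((ws.filter (fun word => word ≠ "/")).length : Int) (i + w + 1))) = [] := by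
      apply pvSliceNil
      simp only [PySem.List.clampIdx]
      split_ifs <;> omega
    simp only [s1nil, s2nil]
    rfl

theorem create_skipgram_changed : Claim_changed_create_skipgram := by
  unfold Claim_changed_create_skipgram; decide

theorem create_skipgram_tight : Claim_exact_create_skipgram := by
  intro ws w _ hD
  unfold D_create_skipgram at hD
  obtain ⟨hw2, hcnt⟩ := hD
  rw [List.countP_eq_length_filter] at hcnt
  simp only [create_skipgram, create_skipgram_alt]
  have e2 : PySem.List.pyRange 1 (min w (((ws.filter (fun word => word ≠ "/")).length : Int) - 1) + 1) = [] := PySem.List.pyRange_one_eq_nil (by omega)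
  simp only [e2, List.foldl_nil]
  have hA : List.foldl (fun pairs i =>
      List.foldl (fun p c => p ++ [(PySem.List.pyGetD (ws.filter (fun word => word ≠ "/")) i "", c)]) pairs
        (PySem.List.slice (ws.filter (fun word => word ≠ "/")) (some (max 0 (i - w))) (some i) ++
          PySem.List.slice (ws.filter (fun word => word ≠ "/")) (some (i + 1)) (some (min ((ws.filter (fun word => word ≠ "/")).length : Int) (i + w + 1)))))
      [] (PySem.List.pyRange 0 ((ws.filter (fun word => word ≠ "/")).length : Int))
      = [] ++ List.flatMap (fun i =>
          List.map (fun c => (PySem.List.pyGetD (ws.filter (fun word => word ≠ "/")) i "", c))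
            (PySem.List.slice (ws.filter (fun word => word ≠ "/")) (some (max 0 (i - w))) (some i) ++
              PySem.List.slice (ws.filter (fun word => word ≠ "/")) (some (i + 1)) (some (min ((ws.filter (fun word => word ≠ "/")).length : Int) (i + w + 1)))))
          (PySem.List.pyRange 0 ((ws.filter (fun word => word ≠ "/")).length : Int)) := by
    refine Eq.trans (PySem.List.foldl_congr_mem _ _ _ _ ?_) (PySem.List.foldl_append_eq_flatMap _ _ _)
    intro acc x hx
    exact PySem.List.foldl_append_singleton_eq_map _ _ _
  rw [hA]
  rw [PySem.List.pyRange_one_cons (by omega : (0 : Int) < ((ws.filter (fun word => word ≠ "/")).length : Int))]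
  rw [List.flatMap_cons, List.nil_append]
  have hs2 : (PySem.List.slice (ws.filter (fun word => word ≠ "/")) (some ((0 : Int) + 1)) (some (min ((ws.filter (fun word => word ≠ "/")).length : Int) ((0 : Int) + w + 1)))).length > 0 := by
    rw [PySem.List.length_slice]
    simp only [PySem.List.clampIdx]
    split_ifs <;> omega
  have hB : (PySem.List.sorted2 ([] : List (Int × Int)) (fun p => p.1) (fun p => p.2)) = [] := rfl
  rw [hB, List.map_nil]
  intro hEq
  rw [List.append_eq_nil_iff, List.map_eq_nil_iff, List.append_eq_nil_iff] at hEq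
  have := hEq.1.2
  rw [← List.length_eq_zero_iff] at this
  omega
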